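-- pv_equiv track=rewrite | github.com/pypi-data/pypi-mirror-163 | packages/ask-question/ask_question-1.1.0-py3-none-any.whl/ask_question-1.1.0.data/scripts/ask_question.py | remove_char_overflow
-- ===== SOURCE A (Python) =====
-- def remove_char_overflow(string:str, char:str, presence_tolerance:int=1, case_sensitive:bool=False) -> str:
--     """ Remove the number of times a specific character appears in a string after the allowed number of times """
--     result = ""
--     for i in string:
--         if case_sensitive == False:
--             if i.lower() == char:
--                 if presence_tolerance > 0:
--                     result+=i
--                     presence_tolerance-=1
--             else:
--                 result+=i
--         else:
--             if i == char:
--                 if presence_tolerance > 0: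
--                     result+=i
--                     presence_tolerance-=1
--             else:
--                 result+=i
--     return result
-- ===== SOURCE B (Python) =====
-- def remove_char_overflow(string: str, char: str, presence_tolerance: int = 1, case_sensitive: bool = False) -> str:
--     """Keep the prefix up to the point where the tolerance runs out, then filter all matches from the rest."""
--     if case_sensitive:
--         pred = lambda c: c == char
--     else:
--         pred = lambda c: c.lower() == char
--     cut = 0
--     remaining = presence_tolerance
--     for c in string:
--         if remaining <= 0:
--             break
--         if pred(c):
--             remaining -= 1
--         cut += 1
--     return string[:cut] + "".join(c for c in string[cut:] if not pred(c))
-- ===== Notes on version B (the rewrite author's own statement) =====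
-- stated objective: simpler
-- what changed: A interleaves a countdown with copying every character; B first finds the cut index where the tolerance is exhausted, keeps that prefix verbatim, and filters all matching characters from the remaining suffix.
import Mathlib
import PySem

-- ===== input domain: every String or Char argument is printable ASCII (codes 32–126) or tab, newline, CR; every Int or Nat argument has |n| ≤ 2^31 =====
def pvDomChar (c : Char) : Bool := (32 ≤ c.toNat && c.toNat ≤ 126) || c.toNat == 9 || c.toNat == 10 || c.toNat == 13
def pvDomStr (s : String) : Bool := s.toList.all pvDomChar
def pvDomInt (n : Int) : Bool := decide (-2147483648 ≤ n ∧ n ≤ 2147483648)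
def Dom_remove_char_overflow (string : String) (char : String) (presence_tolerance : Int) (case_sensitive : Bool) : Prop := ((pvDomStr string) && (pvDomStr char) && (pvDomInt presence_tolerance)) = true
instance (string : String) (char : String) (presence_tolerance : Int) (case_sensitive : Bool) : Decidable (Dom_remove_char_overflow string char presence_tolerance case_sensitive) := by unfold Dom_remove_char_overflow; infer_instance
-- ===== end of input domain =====

-- B replaces A's countdown-while-copying loop by a different decomposition (find the cut index, keep the prefix, filter the suffix); same cost, simpler shape; equivalence proved on Dom.

-- ===== PORT A =====
-- literal transliteration of A's loop: copy characters, counting a tolerance down on matches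
def pvA_loop (char : List Char) (case_sensitive : Bool) : List Char → Int → List Char → List Char
  | [], _, result => result
  | i :: rest, presence_tolerance, result =>
    if case_sensitive = false then
      if PySem.Chars.lower [i] = char then
        if presence_tolerance > 0 then pvA_loop char case_sensitive rest (presence_tolerance - 1) (result ++ [i])
        else pvA_loop char case_sensitive rest presence_tolerance result
      else pvA_loop char case_sensitive rest presence_tolerance (result ++ [i])
    else
      if [i] = char then
        if presence_tolerance > 0 then pvA_loop char case_sensitive rest (presence_tolerance - 1) (result ++ [i])
        else pvA_loop char case_sensitive rest presence_tolerance result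
      else pvA_loop char case_sensitive rest presence_tolerance (result ++ [i])

def remove_char_overflow (string : String) (char : String) (presence_tolerance : Int) (case_sensitive : Bool) : String :=
  String.mk (pvA_loop char.toList case_sensitive string.toList presence_tolerance [])

-- ===== PORT B =====
-- B: the selected matching rule (i.lower() == char vs i == char), as in Source B
def pvB_pred (char : List Char) (case_sensitive : Bool) (c : Char) : Bool :=
  if case_sensitive then [c] = char else PySem.Chars.lower [c] = char

-- B's first loop: the cut index where the tolerance runs out (break on remaining <= 0)
def pvB_cut (pred : Char → Bool) : List Char → Int → Nat
  | [], _ => 0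
  | c :: rest, remaining =>
    if remaining ≤ 0 then 0
    else if pred c then pvB_cut pred rest (remaining - 1) + 1
    else pvB_cut pred rest remaining + 1

-- string[:cut] / string[cut:] with 0 ≤ cut ≤ len are exactly take/drop
def remove_char_overflow_alt (string : String) (char : String) (presence_tolerance : Int) (case_sensitive : Bool) : String :=
  let cl := string.toList
  let pred := pvB_pred char.toList case_sensitive
  let cut := pvB_cut pred cl presence_tolerance
  String.mk (cl.take cut ++ (cl.drop cut).filter (fun c => !pred c))

-- ===== PRECONDITION & SPEC =====
def Spec_remove_char_overflow (string : String) (char : String) (presence_tolerance : Int) (case_sensitive : Bool) (out : String) : Prop := out = remove_char_overflow_alt string char presence_tolerance case_sensitive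
instance (string : String) (char : String) (presence_tolerance : Int) (case_sensitive : Bool) (out : String) : Decidable (Spec_remove_char_overflow string char presence_tolerance case_sensitive out) := by unfold Spec_remove_char_overflow; infer_instance

-- ===== CLAIM (what is proved, stated in full; the proofs are below) =====
def Claim_equal_remove_char_overflow : Prop := ∀ (string : String) (char : String) (presence_tolerance : Int) (case_sensitive : Bool), Dom_remove_char_overflow string char presence_tolerance case_sensitive → Spec_remove_char_overflow string char presence_tolerance case_sensitive (remove_char_overflow string char presence_tolerance case_sensitive)

-- ===== LEMMAS AND PROOFS =====

-- ===== VERDICT (by name: the statement is the Claim_ definition above) =====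
lemma pvB_cut_nonpos (pred : Char → Bool) (l : List Char) (t : Int) (h : t ≤ 0) :
    pvB_cut pred l t = 0 := by
  cases l <;> simp [pvB_cut, h]

lemma pvA_loop_eq (char : List Char) (cs : Bool) :
    ∀ (l : List Char) (t : Int) (acc : List Char),
      pvA_loop char cs l t acc =
        acc ++ (l.take (pvB_cut (pvB_pred char cs) l t) ++
                (l.drop (pvB_cut (pvB_pred char cs) l t)).filter (fun c => !pvB_pred char cs c)) := by
  intro l
  induction l with
  | nil => intro t acc; simp [pvA_loop, pvB_cut]
  | cons i rest ih =>
    intro t acc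
    cases cs with
    | false =>
      by_cases hp : PySem.Chars.lower [i] = char
      · subst hp
        by_cases ht : t ≤ 0
        · have hnt : ¬ t > 0 := by omega
          simp [pvA_loop, pvB_cut, pvB_pred, ht, hnt, ih, pvB_cut_nonpos _ _ _ ht]
        · have hgt : t > 0 := by omega
          simp [pvA_loop, pvB_cut, pvB_pred, ht, hgt, ih]
      · by_cases ht : t ≤ 0
        · have hnt : ¬ t > 0 := by omega
          simp [pvA_loop, pvB_cut, pvB_pred, hp, ht, hnt, ih, pvB_cut_nonpos _ _ _ ht]
        · have hgt : t > 0 := by omega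
          simp [pvA_loop, pvB_cut, pvB_pred, hp, ht, hgt, ih]
    | true =>
      by_cases hp : [i] = char
      · subst hp
        by_cases ht : t ≤ 0
        · have hnt : ¬ t > 0 := by omega
          simp [pvA_loop, pvB_cut, pvB_pred, ht, hnt, ih, pvB_cut_nonpos _ _ _ ht]
        · have hgt : t > 0 := by omega
          simp [pvA_loop, pvB_cut, pvB_pred, ht, hgt, ih]
      · by_cases ht : t ≤ 0
        · have hnt : ¬ t > 0 := by omega
          simp [pvA_loop, pvB_cut, pvB_pred, hp, ht, hnt, ih, pvB_cut_nonpos _ _ _ ht]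
        · have hgt : t > 0 := by omega
          simp [pvA_loop, pvB_cut, pvB_pred, hp, ht, hgt, ih]

-- ===== VERDICT (by name: the statement is the Claim_ definition above) =====
theorem remove_char_overflow_spec : Claim_equal_remove_char_overflow := by
  intro string char t cs _
  unfold Spec_remove_char_overflow remove_char_overflow remove_char_overflow_alt
  rw [pvA_loop_eq]
  simp
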